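-- pv_equiv track=rewrite | github.com/salvador0401/Algoritmos-de-ordenamiento | Polyphase_sort.py | polyphase_phase
-- ===== SOURCE A (Python) =====
-- def polyphase_merge(seq1, seq2):
--     merged_seq = []  # Lista para almacenar la secuencia fusionada
--     i, j = 0, 0  # Índices para recorrer las secuencias
--
--     # Fusionar las secuencias hasta que una de ellas se agote
--     while i < len(seq1) and j < len(seq2):
--         if seq1[i][1] <= seq2[j][1]:  # Comparamos las fechas de llegada
--             merged_seq.append(seq1[i])  # Añadimos el registro de la primera secuencia
--             i += 1
--         else:
--             merged_seq.append(seq2[j])  # Añadimos el registro de la segunda secuencia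
--             j += 1
--
--     # Agregar los elementos restantes de la primera secuencia
--     while i < len(seq1):
--         merged_seq.append(seq1[i])
--         i += 1
--
--     # Agregar los elementos restantes de la segunda secuencia
--     while j < len(seq2):
--         merged_seq.append(seq2[j])
--         j += 1
--
--     return merged_seq  # Devolvemos la secuencia fusionada
--
-- def polyphase_phase(sequences):
--     num_sequences = len(sequences)
--     merged_sequences = []  # Lista para almacenar las secuencias fusionadas
--
--     # Fusionar pares de secuencias
--     for i in range(0, num_sequences, 2):
--         if i + 1 < num_sequences:
--             merged_seq = polyphase_merge(sequences[i], sequences[i + 1])  # Fusionamos dos secuencias consecutivas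
--             merged_sequences.append(merged_seq)
--         else:
--             merged_sequences.append(sequences[i])  # Si solo hay una secuencia restante, la añadimos sin fusionar
--
--     return merged_sequences  # Devolvemos las secuencias fusionadas
-- ===== SOURCE B (Python) =====
-- def polyphase_phase(sequences):
--     merged = []
--     for a, b in zip(sequences[0::2], sequences[1::2]):
--         # Stage 1: for each record of b, its cut position in a (one monotone scan).
--         cuts = []
--         i = 0
--         for rec in b:
--             while i < len(a) and a[i][1] <= rec[1]:
--                 i += 1
--             cuts.append(i)
--         # Stage 2: assemble by splicing slices of a between the records of b.
--         out = []
--         prev = 0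
--         for c, rec in zip(cuts, b):
--             out += a[prev:c]
--             out.append(rec)
--             prev = c
--         out += a[prev:]
--         merged.append(out)
--     merged.extend(sequences[2 * len(merged):])
--     return merged
-- ===== Notes on version B (the rewrite author's own statement) =====
-- stated objective: alternative
-- what changed: Pairs the sequences via stride-2 slices and zip instead of an index loop, and replaces the element-by-element two-pointer merge by a two-stage merge: first compute the list of cut positions of seq2's records in seq1 with one monotone scan, then assemble the output by splicing whole slices of seq1 between those records.
import Mathlib
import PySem

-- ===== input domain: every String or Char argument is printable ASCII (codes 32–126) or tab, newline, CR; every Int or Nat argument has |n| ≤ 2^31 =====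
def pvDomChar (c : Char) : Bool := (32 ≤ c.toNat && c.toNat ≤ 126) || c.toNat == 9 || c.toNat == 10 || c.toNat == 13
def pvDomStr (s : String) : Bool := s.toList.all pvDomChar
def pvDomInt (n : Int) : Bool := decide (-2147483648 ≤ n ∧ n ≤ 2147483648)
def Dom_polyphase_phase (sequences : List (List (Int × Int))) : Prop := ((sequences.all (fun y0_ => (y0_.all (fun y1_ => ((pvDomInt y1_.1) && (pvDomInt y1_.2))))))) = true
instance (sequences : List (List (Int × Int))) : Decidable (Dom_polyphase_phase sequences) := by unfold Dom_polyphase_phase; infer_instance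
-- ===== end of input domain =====

-- B pairs the sequences via stride-2 slices + zip and merges each pair in two
-- stages (cut positions, then slice splicing); same return value, no speed claim.

-- ===== PORT A =====
-- polyphase_merge's main while loop: state is (i, j, merged_seq = acc); the two
-- trailing whiles append seq1[i:] then seq2[j:], rendered as the drops.
def pvMergeALoop (s1 s2 : List (Int × Int)) (i j : Nat) (acc : List (Int × Int)) : List (Int × Int) :=
  if h : i < s1.length ∧ j < s2.length then
    if (s1[i]'h.1).2 ≤ (s2[j]'h.2).2 then
      pvMergeALoop s1 s2 (i+1) j (acc ++ [s1[i]'h.1])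
    else
      pvMergeALoop s1 s2 i (j+1) (acc ++ [s2[j]'h.2])
  else
    acc ++ s1.drop i ++ s2.drop j
termination_by (s1.length - i) + (s2.length - j)
decreasing_by all_goals omega

def pvPolyphaseMerge (s1 s2 : List (Int × Int)) : List (Int × Int) :=
  pvMergeALoop s1 s2 0 0 []

-- for i in range(0, num_sequences, 2): indices are always in range (i < n), so
-- sequences[i] is (pyGet? …).getD [] with the default never used.
def pvPhaseALoop (seqs : List (List (Int × Int))) (n i : Nat) (acc : List (List (Int × Int))) : List (List (Int × Int)) :=
  if i < n then
    if i + 1 < n then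
      pvPhaseALoop seqs n (i+2)
        (acc ++ [pvPolyphaseMerge ((PySem.List.pyGet? seqs (i : Int)).getD [])
                                  ((PySem.List.pyGet? seqs ((i : Int) + 1)).getD [])])
    else
      pvPhaseALoop seqs n (i+2) (acc ++ [(PySem.List.pyGet? seqs (i : Int)).getD []])
  else acc
termination_by n - i
decreasing_by all_goals omega

def polyphase_phase (sequences : List (List (Int × Int))) : List (List (Int × Int)) :=
  pvPhaseALoop sequences sequences.length 0 []

-- ===== PORT B =====
-- xs[0::2] ported by hand (PySem.List.slice? covers it only behind an Option):
-- exact — takes every second element starting at index 0.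
def pvEveryOther {α : Type} : List α → List α
  | [] => []
  | x :: rest => x :: pvEveryOther (rest.drop 1)
termination_by xs => xs.length
decreasing_by simp

-- stage 1, inner 'while i < len(a) and a[i][1] <= rec[1]: i += 1'
def pvAdvance (a : List (Int × Int)) (key : Int) (i : Nat) : Nat :=
  if h : i < a.length then
    if (a[i]'h).2 ≤ key then pvAdvance a key (i+1) else i
  else i
termination_by a.length - i
decreasing_by omega

-- stage 1, 'for rec in b: … cuts.append(i)'
def pvCuts (a : List (Int × Int)) : List (Int × Int) → Nat → List Nat
  | [], _ => []
  | r :: rest, i =>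
    let c := pvAdvance a r.2 i
    c :: pvCuts a rest c

-- stage 2, 'for c, rec in zip(cuts, b): out += a[prev:c]; out.append(rec); prev = c'
-- then 'out += a[prev:]'.  a[prev:c] with natural bounds is (a.drop prev).take (c - prev)
-- (PySem.List.slice_natCast) and a[prev:] is a.drop prev (slice_from_natCast) — exact.
def pvAssemble (a : List (Int × Int)) : List (Nat × (Int × Int)) → Nat → List (Int × Int) → List (Int × Int)
  | [], prev, out => out ++ a.drop prev
  | (c, r) :: rest, prev, out =>
    pvAssemble a rest c (out ++ (a.drop prev).take (c - prev) ++ [r])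

def pvMergeCuts (a b : List (Int × Int)) : List (Int × Int) :=
  pvAssemble a ((pvCuts a b 0).zip b) 0 []

def polyphase_phase_alt (sequences : List (List (Int × Int))) : List (List (Int × Int)) :=
  let merged := ((pvEveryOther sequences).zip (pvEveryOther (sequences.drop 1))).map
      (fun p => pvMergeCuts p.1 p.2)
  merged ++ sequences.drop (2 * merged.length)

-- ===== PRECONDITION & SPEC =====
def Spec_polyphase_phase (sequences : List (List (Int × Int))) (out : List (List (Int × Int))) : Prop := out = polyphase_phase_alt sequences
instance (sequences : List (List (Int × Int))) (out : List (List (Int × Int))) : Decidable (Spec_polyphase_phase sequences out) := by unfold Spec_polyphase_phase; infer_instance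

-- ===== CLAIM =====
def Claim_equal_polyphase_phase : Prop := ∀ (sequences : List (List (Int × Int))), Dom_polyphase_phase sequences → Spec_polyphase_phase sequences (polyphase_phase sequences)

-- ===== LEMMAS AND PROOFS =====

theorem advance_ge (a : List (Int × Int)) (key : Int) (i : Nat) : i ≤ pvAdvance a key i := by
  have H : ∀ (N i : Nat), a.length - i ≤ N → i ≤ pvAdvance a key i := by
    intro N
    induction N with
    | zero =>
      intro i h
      rw [pvAdvance, dif_neg (by omega : ¬ i < a.length)]
    | succ N ih =>
      intro i h
      rw [pvAdvance]
      by_cases hi : i < a.length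
      · rw [dif_pos hi]
        split_ifs with hle
        · exact le_trans (by omega) (ih (i+1) (by omega))
        · exact le_refl i
      · rw [dif_neg hi]
  exact H a.length i (by omega)

theorem assemble_beyond (a : List (Int × Int)) (bs : List (Int × Int)) :
    ∀ (i : Nat) (acc : List (Int × Int)), a.length ≤ i →
      pvAssemble a ((pvCuts a bs i).zip bs) i acc = acc ++ bs := by
  induction bs with
  | nil =>
    intro i acc h
    simp [pvCuts, pvAssemble, List.drop_eq_nil_of_le h]
  | cons r rest ih =>
    intro i acc h
    have hadv : pvAdvance a r.2 i = i := by
      rw [pvAdvance, dif_neg (by omega : ¬ i < a.length)]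
    simp only [pvCuts, hadv, List.zip_cons_cons, pvAssemble]
    rw [ih i _ h]
    simp

theorem assemble_shift (a : List (Int × Int)) (c : Nat) (r : Int × Int)
    (rest : List (Nat × (Int × Int))) (i : Nat) (acc : List (Int × Int))
    (hi : i < a.length) (hc : i < c) :
    pvAssemble a ((c, r) :: rest) i acc = pvAssemble a ((c, r) :: rest) (i+1) (acc ++ [a[i]'hi]) := by
  simp only [pvAssemble]
  have hs : (a.drop i).take (c - i) = a[i]'hi :: (a.drop (i+1)).take (c - (i+1)) := by
    rw [List.drop_eq_getElem_cons hi]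
    have : c - i = (c - (i+1)) + 1 := by omega
    rw [this, List.take_succ_cons]
  rw [hs]
  simp

theorem mergeAB_aux (a b : List (Int × Int)) :
    ∀ (N i j : Nat) (acc : List (Int × Int)),
      (a.length - i) + (b.length - j) ≤ N →
      pvMergeALoop a b i j acc = pvAssemble a ((pvCuts a (b.drop j) i).zip (b.drop j)) i acc := by
  intro N
  induction N with
  | zero =>
    intro i j acc h
    rw [pvMergeALoop, dif_neg (by omega : ¬ (i < a.length ∧ j < b.length))]
    rw [List.drop_eq_nil_of_le (by omega : b.length ≤ j)]
    simp [pvCuts, pvAssemble]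
  | succ N ih =>
    intro i j acc h
    rw [pvMergeALoop]
    by_cases hj : j < b.length
    · have hdropb : b.drop j = b[j]'hj :: b.drop (j+1) := List.drop_eq_getElem_cons hj
      by_cases hi : i < a.length
      · rw [dif_pos ⟨hi, hj⟩]
        by_cases hle : (a[i]'hi).2 ≤ (b[j]'hj).2
        · rw [if_pos hle]
          rw [ih (i+1) j _ (by omega)]
          rw [hdropb]
          simp only [pvCuts, List.zip_cons_cons]
          have hadv : pvAdvance a (b[j]'hj).2 i = pvAdvance a (b[j]'hj).2 (i+1) := by
            rw [pvAdvance, dif_pos hi, if_pos hle]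
          rw [hadv]
          exact (assemble_shift a _ _ _ i acc hi
            (by calc i < i + 1 := by omega
                 _ ≤ pvAdvance a (b[j]'hj).2 (i+1) := advance_ge a _ (i+1))).symm
        · rw [if_neg hle]
          rw [ih i (j+1) _ (by omega)]
          rw [hdropb]
          simp only [pvCuts, List.zip_cons_cons]
          have hadv : pvAdvance a (b[j]'hj).2 i = i := by
            rw [pvAdvance, dif_pos hi, if_neg hle]
          rw [hadv]
          simp [pvAssemble]
      · rw [dif_neg (by omega : ¬ (i < a.length ∧ j < b.length))]
        rw [assemble_beyond a _ i acc (by omega)]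
        rw [List.drop_eq_nil_of_le (by omega : a.length ≤ i)]
        simp
    · rw [dif_neg (by omega : ¬ (i < a.length ∧ j < b.length))]
      rw [List.drop_eq_nil_of_le (by omega : b.length ≤ j)]
      simp [pvCuts, pvAssemble]

theorem merge_eq (a b : List (Int × Int)) : pvPolyphaseMerge a b = pvMergeCuts a b := by
  unfold pvPolyphaseMerge pvMergeCuts
  simpa using mergeAB_aux a b (a.length + b.length) 0 0 [] (by omega)

-- natural list recursion the two phase loops are bridged through
def pvPhasePairs : List (List (Int × Int)) → List (List (Int × Int))
  | [] => []
  | [x] => [x]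
  | _x :: _y :: rest => pvMergeCuts _x _y :: pvPhasePairs rest

theorem pyGetD_in_range (seqs : List (List (Int × Int))) (i : Nat) (h : i < seqs.length) :
    (PySem.List.pyGet? seqs (i : Int)).getD [] = seqs[i]'h := by
  rw [PySem.List.pyGet?_natCast]
  simp [List.getElem?_eq_getElem h]

theorem phaseA_pairs (seqs : List (List (Int × Int))) :
    ∀ (N i : Nat) (acc : List (List (Int × Int))),
      seqs.length - i ≤ N →
      pvPhaseALoop seqs seqs.length i acc = acc ++ pvPhasePairs (seqs.drop i) := by
  intro N
  induction N with
  | zero =>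
    intro i acc h
    rw [pvPhaseALoop, if_neg (by omega), List.drop_eq_nil_of_le (by omega)]
    simp [pvPhasePairs]
  | succ N ih =>
    intro i acc h
    rw [pvPhaseALoop]
    by_cases hi : i < seqs.length
    · rw [if_pos hi]
      have hdrop : seqs.drop i = seqs[i]'hi :: seqs.drop (i+1) := List.drop_eq_getElem_cons hi
      by_cases hi1 : i + 1 < seqs.length
      · rw [if_pos hi1]
        have hdrop1 : seqs.drop (i+1) = seqs[i+1]'hi1 :: seqs.drop (i+2) :=
          List.drop_eq_getElem_cons hi1
        rw [ih (i+2) _ (by omega)]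
        rw [hdrop, hdrop1]
        simp only [pvPhasePairs]
        rw [pyGetD_in_range seqs i hi]
        have : ((i : Int) + 1) = ((i + 1 : Nat) : Int) := by push_cast; ring
        rw [this, pyGetD_in_range seqs (i+1) hi1, merge_eq]
        simp
      · rw [if_neg hi1]
        rw [ih (i+2) _ (by omega)]
        rw [List.drop_eq_nil_of_le (by omega : seqs.length ≤ i + 2)]
        rw [hdrop, List.drop_eq_nil_of_le (by omega : seqs.length ≤ i + 1)]
        simp only [pvPhasePairs]
        rw [pyGetD_in_range seqs i hi]
        simp
    · rw [if_neg hi, List.drop_eq_nil_of_le (by omega)]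
      simp [pvPhasePairs]

theorem phaseB_pairs (seqs : List (List (Int × Int))) :
    polyphase_phase_alt seqs = pvPhasePairs seqs := by
  induction seqs using pvPhasePairs.induct with
  | case1 => simp [polyphase_phase_alt, pvEveryOther, pvPhasePairs]
  | case2 x => simp [polyphase_phase_alt, pvEveryOther, pvPhasePairs]
  | case3 x y rest ih =>
    have e1 : pvEveryOther (x :: y :: rest) = x :: pvEveryOther rest := by
      rw [pvEveryOther]; simp
    have e2 : pvEveryOther ((x :: y :: rest).drop 1) = y :: pvEveryOther (rest.drop 1) := by
      simp only [List.drop_succ_cons, List.drop_zero]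
      rw [pvEveryOther]
    simp only [polyphase_phase_alt] at ih ⊢
    rw [e1, e2]
    simp only [List.zip_cons_cons, List.map_cons, List.length_cons, List.cons_append]
    have harith : 2 * ((((pvEveryOther rest).zip (pvEveryOther (rest.drop 1))).map
        (fun p => pvMergeCuts p.1 p.2)).length + 1)
        = (2 * (((pvEveryOther rest).zip (pvEveryOther (rest.drop 1))).map
        (fun p => pvMergeCuts p.1 p.2)).length) + 1 + 1 := by omega
    rw [harith]
    simp only [List.drop_succ_cons]
    rw [ih]
    simp [pvPhasePairs]

-- ===== VERDICT =====
theorem polyphase_phase_spec : Claim_equal_polyphase_phase := by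
  intro seqs _
  unfold Spec_polyphase_phase polyphase_phase
  rw [phaseB_pairs]
  simpa using phaseA_pairs seqs seqs.length 0 [] (by omega)
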